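-- pv_equiv track=rewrite | github.com/refianto/Cross-Validation-Weka | data.py | result
-- ===== SOURCE A (Python) =====
-- def result(v,c):
-- 	pk = c
-- 	val = []
-- 	for i in range(len(v)) :
-- 		for j in v[i]:
-- 			k = j+1
-- 			pk *= k
-- 		val.append(pk)
-- 	return val
-- ===== SOURCE B (Python) =====
-- from math import prod
--
-- def result(v, c):
--     if not v:
--         return []
--
--     def rec(rows):
--         # returns (prefix products of the per-row products, seeded at 1; total product)
--         if len(rows) == 1:
--             p = prod(j + 1 for j in rows[0])
--             return [p], p
--         mid = len(rows) // 2
--         L, tl = rec(rows[:mid])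
--         R, tr = rec(rows[mid:])
--         return L + [tl * x for x in R], tl * tr
--
--     pre, _ = rec(v)
--     return [c * x for x in pre]
-- ===== Notes on version B (the rewrite author's own statement) =====
-- stated objective: alternative
-- what changed: Replaces the single nested loop with a running accumulator by a divide-and-conquer prefix product: recursively split the row list in halves, compute each half's prefix list and total product, and merge by scaling the right half's prefixes with the left half's total; outputs are finally scaled by c.
import Mathlib
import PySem

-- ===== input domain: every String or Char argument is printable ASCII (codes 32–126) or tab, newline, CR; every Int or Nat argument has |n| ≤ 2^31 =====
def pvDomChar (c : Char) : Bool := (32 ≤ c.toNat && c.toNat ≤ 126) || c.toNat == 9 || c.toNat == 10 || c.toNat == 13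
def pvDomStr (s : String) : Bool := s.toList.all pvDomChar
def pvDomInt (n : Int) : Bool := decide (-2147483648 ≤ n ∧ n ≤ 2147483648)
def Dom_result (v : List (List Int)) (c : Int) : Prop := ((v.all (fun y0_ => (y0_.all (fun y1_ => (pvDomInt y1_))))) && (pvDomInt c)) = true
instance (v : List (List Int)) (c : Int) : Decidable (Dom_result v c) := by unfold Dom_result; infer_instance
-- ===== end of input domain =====

-- B replaces A's single nested loop with a running accumulator by a
-- divide-and-conquer prefix product over the rows; objective: alternative, same cost.

-- ===== PORT A =====
-- A: one nested loop maintaining pk and appending it after each row.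
def stepA (st : Int × List Int) (row : List Int) : Int × List Int :=
  let pk := row.foldl (fun pk j => pk * (j + 1)) st.1
  (pk, st.2 ++ [pk])

def result (v : List (List Int)) (c : Int) : List Int :=
  (v.foldl stepA (c, [])).2

-- ===== PORT B =====
-- B's rec: split the rows in halves, merge prefix lists by scaling the right one.
def recB (rows : List (List Int)) : List Int × Int :=
  if h : rows.length ≤ 1 then
    match rows with
    | [] => ([], 1)  -- never reached from result_alt (it guards v ≠ [])
    | r :: _ =>
      let p := (r.map (fun j => j + 1)).prod
      ([p], p)
  else
    let mid := rows.length / 2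
    let L := recB (rows.take mid)
    let R := recB (rows.drop mid)
    (L.1 ++ R.1.map (fun x => L.2 * x), L.2 * R.2)
termination_by rows.length
decreasing_by
  · simp only [List.length_take]; omega
  · simp only [List.length_drop]; omega

def result_alt (v : List (List Int)) (c : Int) : List Int :=
  if v = [] then []
  else (recB v).1.map (fun x => c * x)

-- ===== PRECONDITION & SPEC =====
def Spec_result (v : List (List Int)) (c : Int) (out : List Int) : Prop := out = result_alt v c
instance (v : List (List Int)) (c : Int) (out : List Int) : Decidable (Spec_result v c out) := by unfold Spec_result; infer_instance

-- ===== CLAIM (what is proved, stated in full; the proofs are below) =====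
def Claim_equal_result : Prop := ∀ (v : List (List Int)) (c : Int), Dom_result v c → Spec_result v c (result v c)

-- ===== LEMMAS AND PROOFS =====

-- per-row product
def rp (r : List Int) : Int := (r.map (fun j => j + 1)).prod

-- prefix products of xs seeded at a
def g (a : Int) : List Int → List Int
  | [] => []
  | x :: xs => (a * x) :: g (a * x) xs

theorem g_append (xs ys : List Int) (a : Int) :
    g a (xs ++ ys) = g a xs ++ g (a * xs.prod) ys := by
  induction xs generalizing a with
  | nil => simp [g]
  | cons x xs ih => simp [g, ih, mul_assoc]

theorem g_scale (xs : List Int) (a : Int) :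
    g a xs = (g 1 xs).map (fun y => a * y) := by
  induction xs generalizing a with
  | nil => simp [g]
  | cons x xs ih =>
      simp only [g, List.map_cons, one_mul, List.cons.injEq]
      refine ⟨trivial, ?_⟩
      rw [ih (a * x), ih x, List.map_map]
      exact List.map_congr_left (fun y _ => by dsimp; ring)

-- A's inner loop is c times the product of (j+1) over the row.
theorem row_foldl_eq_prod (row : List Int) (c : Int) :
    row.foldl (fun pk j => pk * (j + 1)) c = c * rp row := by
  induction row generalizing c with
  | nil => simp [rp]
  | cons x xs ih => simp [rp, ih, mul_assoc]

-- The outer fold's accumulated list factors out of the initial state.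
theorem foldl_acc_append (v : List (List Int)) (pk : Int) (acc : List Int) :
    (v.foldl stepA (pk, acc)).2 = acc ++ (v.foldl stepA (pk, [])).2 := by
  induction v generalizing pk acc with
  | nil => simp
  | cons r rs ih =>
      simp only [List.foldl_cons, stepA]
      conv_lhs => rw [ih]
      conv_rhs => rw [ih]
      simp

-- A computes the prefix products of the per-row products seeded at c.
theorem result_eq_g (v : List (List Int)) (c : Int) :
    result v c = g c (v.map rp) := by
  induction v generalizing c with
  | nil => simp [result, g]
  | cons r rs ih =>
      show (List.foldl stepA (stepA (c, []) r) rs).2 = _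
      simp only [stepA, row_foldl_eq_prod]
      rw [foldl_acc_append]
      simpa [g] using ih (c * rp r)

-- B's rec computes the prefix products seeded at 1 together with the total.
theorem recB_spec (rows : List (List Int)) (h : rows ≠ []) :
    recB rows = (g 1 (rows.map rp), (rows.map rp).prod) := by
  induction rows using recB.induct with
  | case1 _ _ => exact absurd rfl h
  | case2 r tail hle _ =>
      match tail, hle with
      | [], _ => simp [recB, g, rp]
  | case3 rows hgt mid ih1 ih2 =>
      have hlen : 2 ≤ rows.length := by omega
      have htk : rows.take (rows.length / 2) ≠ [] := by
        have : (rows.take (rows.length / 2)).length = rows.length / 2 := by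
          simp only [List.length_take]; omega
        intro he; rw [he] at this; simp at this; omega
      have hdr : rows.drop (rows.length / 2) ≠ [] := by
        have : (rows.drop (rows.length / 2)).length = rows.length - rows.length / 2 := by
          simp
        intro he; rw [he] at this; simp at this; omega
      rw [recB]
      simp only [dif_neg hgt]
      rw [ih1 htk, ih2 hdr]
      have hsplit : rows.map rp
          = (rows.take (rows.length / 2)).map rp ++ (rows.drop (rows.length / 2)).map rp := by
        rw [← List.map_append, List.take_append_drop]
      dsimp only
      rw [Prod.mk.injEq]
      constructor
      · rw [hsplit, g_append, one_mul, g_scale _ ((rows.take (rows.length / 2)).map rp).prod]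
      · rw [hsplit, List.prod_append]

theorem result_eq_alt (v : List (List Int)) (c : Int) : result v c = result_alt v c := by
  rcases eq_or_ne v [] with rfl | h
  · simp [result, result_alt]
  · rw [result_alt, if_neg h, recB_spec v h, result_eq_g]
    exact g_scale (v.map rp) c

-- ===== VERDICT (by name: the statement is the Claim_ definition above) =====
theorem result_spec : Claim_equal_result := by
  intro v c _
  exact result_eq_alt v c
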